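-- pv_equiv track=rewrite | github.com/jgroom33/saos6-saos10-converter | jinja_filters.py | table_flatten
-- ===== SOURCE A (Python) =====
-- def table_flatten(table):
--     """
--     Merge ALL the rows of a table into a single item. This assumes there is no property overlap
--
--     | key | foo | bar | baz |
--     | --- | --- | --- | --- |
--     | 1   | a   |     |     |
--     |     |     | b   |     |
--     |     |     |     | z   |
--
--     Merged
--
--     | key | foo | bar | baz |
--     | --- | --- | --- | --- |
--     | 1   | a   | b   | c   |
--
--     """
--     result = {}
--     for (key, value) in table[0].items():
--         result[key] = ""
--     for row in table:
--         for (key, value) in row.items():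
--             if value != "":
--                 result[key] = value
--     return [result]
-- ===== SOURCE B (Python) =====
-- def _last_nonempty(table, key):
--     # scan rows from the last one; first non-empty value found is the answer
--     for row in reversed(table):
--         v = row.get(key, "")
--         if v != "":
--             return v
--     return ""
--
--
-- def table_flatten(table):
--     # column-major: build the ordered key list first, then look each key up once
--     keys = list(table[0].keys())
--     seen = set(keys)
--     for row in table:
--         for k, v in row.items():
--             if v != "" and k not in seen:
--                 keys.append(k)
--                 seen.add(k)
--     return [{k: _last_nonempty(table, k) for k in keys}]
-- ===== Notes on version B (the rewrite author's own statement) =====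
-- stated objective: alternative
-- what changed: B is column-major: it first builds the ordered key list (table[0]'s keys, then keys first seen with a non-empty value), then for each key scans the rows backwards with an early return to pick the last non-empty value, instead of A's single forward sweep mutating a dict.
-- outside the precondition, e.g. on table_flatten([]): A raises IndexError, B raises IndexError
import Mathlib
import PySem

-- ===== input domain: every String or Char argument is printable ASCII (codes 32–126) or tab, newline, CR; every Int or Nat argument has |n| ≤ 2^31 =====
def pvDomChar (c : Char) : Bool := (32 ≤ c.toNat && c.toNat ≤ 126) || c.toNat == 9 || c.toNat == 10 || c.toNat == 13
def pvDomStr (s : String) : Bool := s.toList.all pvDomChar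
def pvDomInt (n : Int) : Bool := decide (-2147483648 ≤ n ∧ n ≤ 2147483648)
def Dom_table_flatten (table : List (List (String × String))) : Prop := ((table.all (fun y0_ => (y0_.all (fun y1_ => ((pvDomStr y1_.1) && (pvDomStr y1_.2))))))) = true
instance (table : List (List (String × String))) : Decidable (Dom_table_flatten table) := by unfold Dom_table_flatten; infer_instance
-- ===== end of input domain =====

-- B rebuilds the table column-major (ordered key list, then per-key backward scan for the
-- last non-empty value) instead of A's forward sweep mutating a dict; alternative, not faster.


-- ===== PORT A =====
def table_flatten (table : List (List (String × String))) : List (List (String × String)) :=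
  match table with
  | [] => []  -- table[0] raises IndexError here; excluded by Pre_table_flatten
  | r0 :: _ =>
    let result : PySem.Dict String String :=
      r0.foldl (fun d p => d.insert p.1 "") PySem.Dict.empty
    let result :=
      table.foldl (fun d row =>
        row.foldl (fun d p => if p.2 != "" then d.insert p.1 p.2 else d) d) result
    [result.items]

-- ===== PORT B =====
-- helper _last_nonempty: scan rows from the end, first non-empty value of `key` wins
def lastNonEmptyRows (rows : List (List (String × String))) (key : String) : String :=
  match rows with
  | [] => ""
  | row :: rest =>
    let v := (PySem.Dict.mk row).getD key ""
    if v != "" then v else lastNonEmptyRows rest key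

def table_flatten_alt (table : List (List (String × String))) : List (List (String × String)) :=
  match table with
  | [] => []  -- table[0] raises IndexError here as well
  | r0 :: _ =>
    let ks0 := r0.map Prod.fst
    -- state: (keys, seen); `seen = set(keys)` gives the O(1) membership test of Source B
    let st :=
      table.foldl (fun st row =>
        row.foldl (fun (st : List String × PySem.Set String) p =>
          if p.2 != "" && !st.2.contains p.1 then (st.1 ++ [p.1], st.2.add p.1) else st) st)
        (ks0, PySem.Set.ofList ks0)
    -- dict comprehension over the keys (distinct under Pre_), an assoc list in key order
    [st.1.map (fun k => (k, lastNonEmptyRows table.reverse k))]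

-- ===== PRECONDITION & SPEC =====
-- Pre_ excludes the empty table (A raises IndexError) and rows whose assoc list repeats a
-- key: a row is a Python dict, so duplicate keys cannot arise from any real input.
def Pre_table_flatten (table : List (List (String × String))) : Prop :=
  table ≠ [] ∧ ∀ row ∈ table, (row.map Prod.fst).Nodup
instance (table : List (List (String × String))) : Decidable (Pre_table_flatten table) := by
  unfold Pre_table_flatten; infer_instance

def pvWitness_table_flatten : (List (List (String × String))) :=
  [[("a", "1"), ("b", "")], [("b", "2")]]

def Spec_table_flatten (table : List (List (String × String))) (out : List (List (String × String))) : Prop := out = table_flatten_alt table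
instance (table : List (List (String × String))) (out : List (List (String × String))) : Decidable (Spec_table_flatten table out) := by unfold Spec_table_flatten; infer_instance

-- ===== CLAIM (what is proved, stated in full; the proofs are below) =====
def Claim_equal_table_flatten : Prop := ∀ (table : List (List (String × String))), Dom_table_flatten table → Pre_table_flatten table → Spec_table_flatten table (table_flatten table)

-- ===== LEMMAS AND PROOFS =====

-- keys of A's inner row loop track B's inner (keys, seen) loop
theorem keys_inner (row : List (String × String)) :
    ∀ (d : PySem.Dict String String) (st : List String × PySem.Set String),
    d.keys = st.1 → (∀ x, x ∈ st.2 ↔ x ∈ st.1) →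
    (row.foldl (fun d p => if p.2 != "" then d.insert p.1 p.2 else d) d).keys
      = (row.foldl (fun (st : List String × PySem.Set String) p =>
          if p.2 != "" && !st.2.contains p.1 then (st.1 ++ [p.1], st.2.add p.1) else st) st).1
    ∧ (∀ x, x ∈ (row.foldl (fun (st : List String × PySem.Set String) p =>
          if p.2 != "" && !st.2.contains p.1 then (st.1 ++ [p.1], st.2.add p.1) else st) st).2
        ↔ x ∈ (row.foldl (fun (st : List String × PySem.Set String) p =>
          if p.2 != "" && !st.2.contains p.1 then (st.1 ++ [p.1], st.2.add p.1) else st) st).1) := by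
  induction row with
  | nil => intro d st h hs; exact ⟨h, hs⟩
  | cons p rest ih =>
    intro d st h hs
    simp only [List.foldl_cons]
    by_cases hv : p.2 = ""
    · simp only [hv, bne_self_eq_false, Bool.false_and, Bool.false_eq_true, if_false]
      exact ih d st h hs
    · have hv' : (p.2 != "") = true := by simp [bne, hv]
      by_cases hc : p.1 ∈ st.1
      · have hcont : d.contains p.1 = true := by
          rw [PySem.Dict.contains_eq_decide_mem_keys]; simp [h, hc]
        have hseen : st.2.contains p.1 = true :=
          List.contains_iff_mem.mpr ((hs p.1).mpr hc)
        simp only [hv', hseen, Bool.not_true, Bool.and_false, Bool.false_eq_true, if_false,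
          if_true]
        exact ih _ st (by rw [PySem.Dict.keys_insert_of_contains _ _ hcont, h]) hs
      · have hcont : d.contains p.1 = false := by
          rw [PySem.Dict.contains_eq_decide_mem_keys]; simp [h, hc]
        have hseen : st.2.contains p.1 = false := by
          by_contra hx
          exact hc ((hs p.1).mp (List.contains_iff_mem.mp (by simpa using hx)))
        simp only [hv', hseen, Bool.not_false, Bool.and_true, if_true]
        refine ih _ _ (by rw [PySem.Dict.keys_insert_of_not_contains _ _ hcont, h]) ?_
        intro x
        rw [PySem.Set.mem_add, List.mem_append, List.mem_singleton, hs x]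

-- keys of A's outer loop track B's outer key loop
theorem keys_outer (table : List (List (String × String))) :
    ∀ (d : PySem.Dict String String) (st : List String × PySem.Set String),
    d.keys = st.1 → (∀ x, x ∈ st.2 ↔ x ∈ st.1) →
    (table.foldl (fun d row =>
        row.foldl (fun d p => if p.2 != "" then d.insert p.1 p.2 else d) d) d).keys
      = (table.foldl (fun st row =>
        row.foldl (fun (st : List String × PySem.Set String) p =>
          if p.2 != "" && !st.2.contains p.1 then (st.1 ++ [p.1], st.2.add p.1) else st) st) st).1 := by
  induction table with
  | nil => intro d st h _; simpa using h
  | cons row rest ih =>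
    intro d st h hs
    simp only [List.foldl_cons]
    exact ih _ _ (keys_inner row d st h hs).1 (keys_inner row d st h hs).2

-- the init loop over table[0] installs exactly its keys
theorem keys_init (r0 : List (String × String)) :
    ∀ (d : PySem.Dict String String), (r0.map Prod.fst).Nodup →
    (∀ p ∈ r0, d.contains p.1 = false) →
    (r0.foldl (fun d p => d.insert p.1 "") d).keys = d.keys ++ r0.map Prod.fst := by
  induction r0 with
  | nil => intro d _ _; simp
  | cons p rest ih =>
    intro d hnd hfresh
    simp only [List.foldl_cons, List.map_cons]
    have hcont : d.contains p.1 = false := hfresh p (by simp)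
    have hrest : ∀ q ∈ rest, (d.insert p.1 "").contains q.1 = false := by
      intro q hq
      rw [PySem.Dict.contains_insert]
      have hnd' : p.1 ∉ rest.map Prod.fst ∧ (rest.map Prod.fst).Nodup := by
        simpa [List.nodup_cons] using hnd
      have hne : q.1 ≠ p.1 := by
        intro hx
        exact hnd'.1 (hx ▸ List.mem_map_of_mem hq)
      simp [hne, hfresh q (List.mem_cons_of_mem _ hq)]
    have hnd' : p.1 ∉ rest.map Prod.fst ∧ (rest.map Prod.fst).Nodup := by
      simpa [List.nodup_cons] using hnd
    rw [ih _ hnd'.2 hrest,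
        PySem.Dict.keys_insert_of_not_contains _ _ hcont]
    simp

-- the init loop leaves every lookup at ""
theorem getD_init (r0 : List (String × String)) :
    ∀ (d : PySem.Dict String String) (k : String), d.getD k "" = "" →
    (r0.foldl (fun d p => d.insert p.1 "") d).getD k "" = "" := by
  induction r0 with
  | nil => intro d k h; simpa using h
  | cons p rest ih =>
    intro d k h
    simp only [List.foldl_cons]
    refine ih _ _ ?_
    rw [PySem.Dict.getD_insert]
    split <;> simp [h]

-- a row without key k does not change the lookup at k
theorem getD_no_key (l : List (String × String)) :
    ∀ (d : PySem.Dict String String) (k : String), k ∉ l.map Prod.fst →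
    (l.foldl (fun d p => if p.2 != "" then d.insert p.1 p.2 else d) d).getD k "" = d.getD k "" := by
  induction l with
  | nil => intro d k _; simp
  | cons p rest ih =>
    intro d k h
    simp only [List.foldl_cons]
    have hne : k ≠ p.1 := by intro hx; exact h (by simp [hx])
    have h2 : k ∉ rest.map Prod.fst := by intro hx; exact h (by simp [hx])
    rw [ih _ _ h2]
    split
    · rw [PySem.Dict.getD_insert, if_neg hne]
    · rfl

-- A's inner loop over one (duplicate-free) row = B's row.get test
theorem getD_inner (row : List (String × String)) :
    ∀ (d : PySem.Dict String String) (k : String), (row.map Prod.fst).Nodup →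
    (row.foldl (fun d p => if p.2 != "" then d.insert p.1 p.2 else d) d).getD k ""
      = (if (PySem.Dict.mk row).getD k "" != "" then (PySem.Dict.mk row).getD k "" else d.getD k "") := by
  induction row with
  | nil =>
    intro d k _
    simp [PySem.Dict.getD_eq_get?_getD, PySem.Dict.get?]
  | cons p rest ih =>
    intro d k hnd
    have hnd' : p.1 ∉ rest.map Prod.fst ∧ (rest.map Prod.fst).Nodup := by
      simpa [List.nodup_cons] using hnd
    have hmk : (PySem.Dict.mk (p :: rest)).getD k ""
        = if (p.1 == k) = true then p.2 else (PySem.Dict.mk rest).getD k "" := by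
      rw [PySem.Dict.getD_eq_get?_getD, PySem.Dict.get?_mk_cons]
      split
      · rfl
      · rw [PySem.Dict.getD_eq_get?_getD]
    simp only [List.foldl_cons]
    by_cases hk : p.1 = k
    · have hnk : k ∉ rest.map Prod.fst := hk ▸ hnd'.1
      have hmkv : (PySem.Dict.mk (p :: rest)).getD k "" = p.2 := by
        rw [hmk, if_pos (by simp [hk])]
      rw [getD_no_key rest _ _ hnk, hmkv]
      by_cases hv : (p.2 != "") = true
      · rw [if_pos hv, if_pos hv, PySem.Dict.getD_insert, if_pos hk.symm]
      · rw [if_neg hv, if_neg hv]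
    · have hrest : (PySem.Dict.mk (p :: rest)).getD k "" = (PySem.Dict.mk rest).getD k "" := by
        rw [hmk, if_neg (by simp [hk])]
      have hstep : (if (p.2 != "") = true then d.insert p.1 p.2 else d).getD k "" = d.getD k "" := by
        by_cases hv : (p.2 != "") = true
        · rw [if_pos hv, PySem.Dict.getD_insert, if_neg (fun hx => hk hx.symm)]
        · rw [if_neg hv]
      rw [hrest, ih _ _ hnd'.2, hstep]


-- appending a row at the end of the scan order
theorem lastNonEmptyRows_append (xs : List (List (String × String))) (row : List (String × String)) (k : String) :
    lastNonEmptyRows (xs ++ [row]) k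
      = (if lastNonEmptyRows xs k != "" then lastNonEmptyRows xs k
         else if (PySem.Dict.mk row).getD k "" != "" then (PySem.Dict.mk row).getD k "" else "") := by
  induction xs with
  | nil => simp [lastNonEmptyRows]
  | cons r rest ih =>
    simp only [List.cons_append, lastNonEmptyRows]
    by_cases hv : ((PySem.Dict.mk r).getD k "" != "") = true
    · simp [hv]
    · simp only [Bool.not_eq_true] at hv
      simp [hv, ih]

-- A's whole sweep computes, at each key, B's backward scan
theorem getD_outer (table : List (List (String × String))) :
    ∀ (d : PySem.Dict String String) (k : String), (∀ row ∈ table, (row.map Prod.fst).Nodup) →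
    (table.foldl (fun d row =>
        row.foldl (fun d p => if p.2 != "" then d.insert p.1 p.2 else d) d) d).getD k ""
      = (if lastNonEmptyRows table.reverse k != "" then lastNonEmptyRows table.reverse k
         else d.getD k "") := by
  induction table with
  | nil => intro d k _; simp [lastNonEmptyRows]
  | cons row rest ih =>
    intro d k hnd
    simp only [List.foldl_cons, List.reverse_cons]
    rw [ih _ _ (fun r hr => hnd r (List.mem_cons_of_mem _ hr)),
        getD_inner row d k (hnd row (by simp)),
        lastNonEmptyRows_append]
    by_cases hw : (lastNonEmptyRows rest.reverse k != "") = true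
    · simp [hw]
    · simp only [Bool.not_eq_true] at hw
      by_cases hv : ((PySem.Dict.mk row).getD k "" != "") = true
      · simp [hw, hv]
      · simp only [Bool.not_eq_true] at hv
        simp [hw, hv]

-- the `seen = set(keys)` invariant survives B's inner loop
theorem bkeys_invariant (row : List (String × String)) :
    ∀ (st : List String × PySem.Set String), (∀ x, x ∈ st.2 ↔ x ∈ st.1) →
    (∀ x, x ∈ (row.foldl (fun (st : List String × PySem.Set String) p =>
        if p.2 != "" && !st.2.contains p.1 then (st.1 ++ [p.1], st.2.add p.1) else st) st).2
      ↔ x ∈ (row.foldl (fun (st : List String × PySem.Set String) p =>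
        if p.2 != "" && !st.2.contains p.1 then (st.1 ++ [p.1], st.2.add p.1) else st) st).1) := by
  induction row with
  | nil => intro st hs; exact hs
  | cons p rest ih =>
    intro st hs
    simp only [List.foldl_cons]
    split
    · refine ih _ ?_
      intro x
      rw [PySem.Set.mem_add, List.mem_append, List.mem_singleton, hs x]
    · exact ih _ hs

theorem bkeys_inner_nodup (row : List (String × String)) :
    ∀ (st : List String × PySem.Set String), st.1.Nodup → (∀ x, x ∈ st.2 ↔ x ∈ st.1) →
    (row.foldl (fun (st : List String × PySem.Set String) p =>
        if p.2 != "" && !st.2.contains p.1 then (st.1 ++ [p.1], st.2.add p.1) else st) st).1.Nodup := by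
  induction row with
  | nil => intro st h _; simpa using h
  | cons p rest ih =>
    intro st h hs
    simp only [List.foldl_cons]
    split
    · rename_i hcond
      have hc : p.1 ∉ st.1 := by
        intro hx
        simp at hcond
        exact hcond.2 ((hs p.1).mpr hx)
      refine ih _ ?_ ?_
      · rw [List.nodup_append]
        refine ⟨h, List.nodup_singleton _, ?_⟩
        intro a ha b hb he
        subst he
        exact hc ((List.mem_singleton.mp hb) ▸ ha)
      · intro x
        rw [PySem.Set.mem_add, List.mem_append, List.mem_singleton, hs x]
    · exact ih _ h hs

theorem bkeys_nodup (table : List (List (String × String))) :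
    ∀ (st : List String × PySem.Set String), st.1.Nodup → (∀ x, x ∈ st.2 ↔ x ∈ st.1) →
    (table.foldl (fun st row =>
        row.foldl (fun (st : List String × PySem.Set String) p =>
          if p.2 != "" && !st.2.contains p.1 then (st.1 ++ [p.1], st.2.add p.1) else st) st) st).1.Nodup := by
  induction table with
  | nil => intro st h _; simpa using h
  | cons row rest ih =>
    intro st h hs
    simp only [List.foldl_cons]
    exact ih _ (bkeys_inner_nodup row st h hs) (bkeys_invariant row st hs)

-- ===== VERDICT (by name: the statement is the Claim_ definition above) =====
theorem table_flatten_spec : Claim_equal_table_flatten := by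
  intro table _ pre
  unfold Spec_table_flatten
  match htab : table with
  | [] => exact absurd rfl pre.1
  | r0 :: rest =>
    simp only [table_flatten, table_flatten_alt]
    have hnd0 : (r0.map Prod.fst).Nodup := pre.2 r0 (by simp)
    have hinitkeys : ((r0.foldl (fun d p => d.insert p.1 "") PySem.Dict.empty :
        PySem.Dict String String)).keys = r0.map Prod.fst := by
      rw [keys_init r0 _ hnd0 (fun p _ => PySem.Dict.contains_empty p.1)]
      simp
    have hs0 : ∀ x, x ∈ PySem.Set.ofList (r0.map Prod.fst) ↔ x ∈ r0.map Prod.fst :=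
      fun x => PySem.Set.mem_ofList _ x
    have hkeys := keys_outer (r0 :: rest) _ (r0.map Prod.fst, PySem.Set.ofList (r0.map Prod.fst))
      hinitkeys hs0
    have hbnodup := bkeys_nodup (r0 :: rest) (r0.map Prod.fst, PySem.Set.ofList (r0.map Prod.fst))
      hnd0 hs0
    have hanodup : ((r0 :: rest).foldl (fun d row =>
        row.foldl (fun d p => if p.2 != "" then d.insert p.1 p.2 else d) d)
        (r0.foldl (fun d p => d.insert p.1 "") PySem.Dict.empty)).keys.Nodup := by
      rw [hkeys]; exact hbnodup
    congr 1
    rw [PySem.Dict.items_eq_map_keys _ hanodup "", hkeys]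
    apply List.map_congr_left
    intro k _
    rw [getD_outer (r0 :: rest) _ k pre.2,
        getD_init r0 _ k (PySem.Dict.getD_empty k "")]
    by_cases hw : (lastNonEmptyRows (r0 :: rest).reverse k != "") = true
    · rw [if_pos hw]
    · rw [if_neg hw]
      rw [Bool.not_eq_true, bne_eq_false_iff_eq] at hw
      rw [hw]
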